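-- pv_equiv track=rewrite | github.com/pudingtabi/mynfini | mynfini/mynfini/advanced_ai_orchestrator.py | _identify_player_patterns
-- ===== SOURCE A (Python) =====
-- from typing import Dict, List, Optional, Any, Tuple
--
-- def _identify_player_patterns(description: str, player_history: Dict) -> List[str]:
--     """Identify emerging player behavior patterns"""
--     patterns = []
--
--     # Environmental usage pattern
--     if 'environment' in description.lower() or any(word in description.lower() for word in ['shadow', 'terrain', 'structure', 'object']):
--         patterns.append('environmental_innovator')
--
--     # Risk-taking pattern
--     if any(word in description.lower() for word in ['reckless', 'desperate', 'all in', 'everything']):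
--         patterns.append('risk_taker')
--
--     # Protector pattern
--     if any(word in description.lower() for word in ['protect', 'shield', 'defend', 'save']):
--         patterns.append('protector')
--
--     # Deception pattern
--     if any(word in description.lower() for word in ['trick', 'deceive', 'misdirect', 'feint']):
--         patterns.append('deceiver')
--
--     return patterns
-- ===== SOURCE B (Python) =====
-- _KEYWORD_LABELS = (
--     ('environment', 'environmental_innovator'),
--     ('shadow', 'environmental_innovator'),
--     ('terrain', 'environmental_innovator'),
--     ('structure', 'environmental_innovator'),
--     ('object', 'environmental_innovator'),
--     ('reckless', 'risk_taker'),
--     ('desperate', 'risk_taker'),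
--     ('all in', 'risk_taker'),
--     ('everything', 'risk_taker'),
--     ('protect', 'protector'),
--     ('shield', 'protector'),
--     ('defend', 'protector'),
--     ('save', 'protector'),
--     ('trick', 'deceiver'),
--     ('deceive', 'deceiver'),
--     ('misdirect', 'deceiver'),
--     ('feint', 'deceiver'),
-- )
-- _LABEL_ORDER = ('environmental_innovator', 'risk_taker', 'protector', 'deceiver')
--
-- def _identify_player_patterns(description, player_history):
--     """Single left-to-right scan over positions: at each position, record the
--     label of every keyword that starts there; emit labels in canonical order."""
--     desc = description.lower()
--     found = set()
--     for i in range(len(desc) + 1):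
--         for word, label in _KEYWORD_LABELS:
--             if desc.startswith(word, i):
--                 found.add(label)
--     return [label for label in _LABEL_ORDER if label in found]
-- ===== Notes on version B (the rewrite author's own statement) =====
-- stated objective: alternative
-- what changed: Replaced per-branch substring searches with a single left-to-right scan over all positions of the lowered description that tests each keyword with startswith at that position, accumulates matched labels in a set, and finally emits labels in canonical order.
import Mathlib
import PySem

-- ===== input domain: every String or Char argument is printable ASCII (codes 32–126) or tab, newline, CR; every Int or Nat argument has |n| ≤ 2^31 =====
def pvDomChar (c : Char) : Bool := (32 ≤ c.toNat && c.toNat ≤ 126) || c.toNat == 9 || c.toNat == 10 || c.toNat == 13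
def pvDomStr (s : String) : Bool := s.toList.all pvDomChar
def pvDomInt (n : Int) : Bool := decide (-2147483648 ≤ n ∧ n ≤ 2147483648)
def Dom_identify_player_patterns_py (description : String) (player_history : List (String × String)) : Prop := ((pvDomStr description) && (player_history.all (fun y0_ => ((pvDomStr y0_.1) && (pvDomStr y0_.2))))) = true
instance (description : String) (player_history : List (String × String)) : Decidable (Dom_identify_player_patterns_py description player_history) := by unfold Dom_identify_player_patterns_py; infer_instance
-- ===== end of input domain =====

-- B replaces A's per-branch substring searches by a single position scan with startswith, collecting matched labels in a set and emitting them in canonical order (alternative algorithm, same results).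


-- ===== PORT A =====
-- Port of A: four independent branches, each recomputing description.lower() and running substring searches.
def identify_player_patterns_py (description : String) (_player_history : List (String × String)) : List String :=
  let patterns : List String := []
  let patterns := if PySem.Str.isIn "environment" (PySem.Str.lower description)
      || ["shadow", "terrain", "structure", "object"].any (fun word => PySem.Str.isIn word (PySem.Str.lower description))
    then patterns ++ ["environmental_innovator"] else patterns
  let patterns := if ["reckless", "desperate", "all in", "everything"].any (fun word => PySem.Str.isIn word (PySem.Str.lower description))
    then patterns ++ ["risk_taker"] else patterns
  let patterns := if ["protect", "shield", "defend", "save"].any (fun word => PySem.Str.isIn word (PySem.Str.lower description))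
    then patterns ++ ["protector"] else patterns
  let patterns := if ["trick", "deceive", "misdirect", "feint"].any (fun word => PySem.Str.isIn word (PySem.Str.lower description))
    then patterns ++ ["deceiver"] else patterns
  patterns

-- ===== PORT B =====
def pvKwLabels : List (String × String) :=
  [("environment", "environmental_innovator"), ("shadow", "environmental_innovator"),
   ("terrain", "environmental_innovator"), ("structure", "environmental_innovator"),
   ("object", "environmental_innovator"),
   ("reckless", "risk_taker"), ("desperate", "risk_taker"),
   ("all in", "risk_taker"), ("everything", "risk_taker"),
   ("protect", "protector"), ("shield", "protector"),
   ("defend", "protector"), ("save", "protector"),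
   ("trick", "deceiver"), ("deceive", "deceiver"),
   ("misdirect", "deceiver"), ("feint", "deceiver")]

def pvLabelOrder : List String :=
  ["environmental_innovator", "risk_taker", "protector", "deceiver"]

-- one position of B's scan: desc.startswith(word, i) is Chars.startswith on the suffix starting at i
def pvStep (found : PySem.Set String) (suffix : List Char) : PySem.Set String :=
  pvKwLabels.foldl
    (fun f e => if PySem.Chars.startswith suffix e.1.toList then PySem.Set.add f e.2 else f) found

-- B's 'for i in range(len(desc) + 1)': structural recursion over the suffixes of desc (incl. the empty one)
def pvScan (found : PySem.Set String) : List Char → PySem.Set String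
  | [] => pvStep found []
  | c :: t => pvScan (pvStep found (c :: t)) t

def identify_player_patterns_py_alt (description : String) (_player_history : List (String × String)) : List String :=
  let desc := (PySem.Str.lower description).toList
  let found := pvScan PySem.Set.empty desc
  pvLabelOrder.filter (fun lab => PySem.Set.contains found lab)

-- ===== PRECONDITION & SPEC =====
def Spec_identify_player_patterns_py (description : String) (player_history : List (String × String)) (out : List String) : Prop := out = identify_player_patterns_py_alt description player_history
instance (description : String) (player_history : List (String × String)) (out : List String) : Decidable (Spec_identify_player_patterns_py description player_history out) := by unfold Spec_identify_player_patterns_py; infer_instance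

-- ===== CLAIM (what is proved, stated in full; the proofs are below) =====
def Claim_equal_identify_player_patterns_py : Prop := ∀ (description : String) (player_history : List (String × String)), Dom_identify_player_patterns_py description player_history → Spec_identify_player_patterns_py description player_history (identify_player_patterns_py description player_history)

-- ===== LEMMAS AND PROOFS =====

-- membership through a conditional add-fold over a table
theorem pv_mem_foldl_add_if {α β : Type} [BEq β] [LawfulBEq β] (t : List α) (cond : α → Bool) (g : α → β) (found : PySem.Set β) (lab : β) :
    lab ∈ t.foldl (fun f e => if cond e then PySem.Set.add f (g e) else f) found ↔
      lab ∈ found ∨ ∃ e ∈ t, cond e = true ∧ lab = g e := by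
  induction t generalizing found with
  | nil => simp
  | cons a t ih =>
    simp only [List.foldl_cons, ih, List.mem_cons]
    by_cases h : cond a = true
    · simp [h, PySem.Set.mem_add]; tauto
    · simp [h]

-- membership through one position of the scan
theorem pv_mem_step (found : PySem.Set String) (l : List Char) (lab : String) :
    lab ∈ pvStep found l ↔ lab ∈ found ∨ ∃ e ∈ pvKwLabels, e.1.toList <+: l ∧ lab = e.2 := by
  unfold pvStep
  rw [pv_mem_foldl_add_if]
  simp only [PySem.Chars.startswith_iff]

-- membership in the completed scan: some keyword of the label occurs at some position
theorem pv_mem_scan (l : List Char) (found : PySem.Set String) (lab : String) :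
    lab ∈ pvScan found l ↔ lab ∈ found ∨ ∃ e ∈ pvKwLabels, (∃ j, e.1.toList <+: l.drop j) ∧ lab = e.2 := by
  induction l generalizing found with
  | nil =>
    rw [pvScan, pv_mem_step]
    simp
  | cons c t ih =>
    rw [pvScan, ih, pv_mem_step]
    constructor
    · rintro ((hf | ⟨e, he, hp, hl⟩) | ⟨e, he, ⟨j, hp⟩, hl⟩)
      · exact Or.inl hf
      · exact Or.inr ⟨e, he, ⟨0, hp⟩, hl⟩
      · exact Or.inr ⟨e, he, ⟨j + 1, hp⟩, hl⟩
    · rintro (hf | ⟨e, he, ⟨j, hp⟩, hl⟩)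
      · exact Or.inl (Or.inl hf)
      · cases j with
        | zero => exact Or.inl (Or.inr ⟨e, he, hp, hl⟩)
        | succ j => exact Or.inr ⟨e, he, ⟨j, hp⟩, hl⟩

theorem pv_contains_scan (l : List Char) (lab : String) :
    PySem.Set.contains (pvScan PySem.Set.empty l) lab = true ↔
      ∃ e ∈ pvKwLabels, PySem.Chars.isIn e.1.toList l = true ∧ lab = e.2 := by
  rw [PySem.Set.contains_iff, pv_mem_scan]
  simp only [← PySem.Chars.exists_prefix_drop_iff_isIn]
  constructor
  · rintro (h | h)
    · cases h
    · exact h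
  · exact Or.inr

-- the four label-specific membership conditions, as A's keyword disjunctions
theorem pv_c1 (l : List Char) :
    PySem.Set.contains (pvScan PySem.Set.empty l) "environmental_innovator" =
      (["environment", "shadow", "terrain", "structure", "object"].any (fun w => PySem.Chars.isIn w.toList l)) := by
  rw [Bool.eq_iff_iff, pv_contains_scan]
  simp [pvKwLabels]

theorem pv_c2 (l : List Char) :
    PySem.Set.contains (pvScan PySem.Set.empty l) "risk_taker" =
      (["reckless", "desperate", "all in", "everything"].any (fun w => PySem.Chars.isIn w.toList l)) := by
  rw [Bool.eq_iff_iff, pv_contains_scan]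
  simp [pvKwLabels]

theorem pv_c3 (l : List Char) :
    PySem.Set.contains (pvScan PySem.Set.empty l) "protector" =
      (["protect", "shield", "defend", "save"].any (fun w => PySem.Chars.isIn w.toList l)) := by
  rw [Bool.eq_iff_iff, pv_contains_scan]
  simp [pvKwLabels]

theorem pv_c4 (l : List Char) :
    PySem.Set.contains (pvScan PySem.Set.empty l) "deceiver" =
      (["trick", "deceive", "misdirect", "feint"].any (fun w => PySem.Chars.isIn w.toList l)) := by
  rw [Bool.eq_iff_iff, pv_contains_scan]
  simp [pvKwLabels]

-- ===== VERDICT (by name: the statement is the Claim_ definition above) =====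
theorem identify_player_patterns_py_spec : Claim_equal_identify_player_patterns_py := by
  intro description player_history _
  unfold Spec_identify_player_patterns_py
  unfold identify_player_patterns_py identify_player_patterns_py_alt pvLabelOrder
  simp only [PySem.Str.isIn_eq, PySem.Str.toList_lower, List.filter_cons, List.filter_nil]
  rw [pv_c1, pv_c2, pv_c3, pv_c4]
  simp only [List.any_cons, List.any_nil, Bool.or_false, List.nil_append]
  split_ifs <;> simp_all
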